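-- pv_equiv track=rewrite | github.com/BartekASTAR/zbiorCKE | arkusze/_inne/na10_03/zad2.py | fareyN
-- ===== SOURCE A (Python) =====
-- import math
--
-- def fareyN(n):
--     farey = [[0, 1], [1, 1]]
--     czyDodanoElement = True
--     while czyDodanoElement:
--         czyDodanoElement = False
--         new_farey = farey
--         for i in range(len(farey)-1):
--             new_item = [farey[i][0]+farey[i+1][0], farey[i][1]+farey[i+1][1]]
--             dzielnik = math.gcd(new_item[0], new_item[1])
--             new_item = [new_item[0]//dzielnik, new_item[1]//dzielnik] #  forma nieskracalna ulamka
--             if new_item[1] > n: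
--                 continue
--             else:
--                 czyDodanoElement = True
--                 new_farey.insert(i+1, new_item)
--         farey = new_farey
--     return farey
-- ===== SOURCE B (Python) =====
-- def fareyN(n):
--     # Stern-Brocot / Farey next-term recurrence: each term emitted in O(1).
--     m = n if n > 1 else 1
--     res = [[0, 1]]
--     a, b, c, d = 0, 1, 1, m
--     while c <= m:
--         k = (m + b) // d
--         res.append([c, d])
--         a, b, c, d = c, d, k * c - a, k * d - b
--     return res
-- ===== Notes on version B (the rewrite author's own statement) =====
-- stated objective: faster
-- what changed: Replaced the repeated mediant-insertion passes over a growing list (re-scanning and inserting until a fixed point) with the classic Farey next-term recurrence k=(n+b)//d that emits each term of F_n once, left to right, in O(1).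
import Mathlib
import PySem

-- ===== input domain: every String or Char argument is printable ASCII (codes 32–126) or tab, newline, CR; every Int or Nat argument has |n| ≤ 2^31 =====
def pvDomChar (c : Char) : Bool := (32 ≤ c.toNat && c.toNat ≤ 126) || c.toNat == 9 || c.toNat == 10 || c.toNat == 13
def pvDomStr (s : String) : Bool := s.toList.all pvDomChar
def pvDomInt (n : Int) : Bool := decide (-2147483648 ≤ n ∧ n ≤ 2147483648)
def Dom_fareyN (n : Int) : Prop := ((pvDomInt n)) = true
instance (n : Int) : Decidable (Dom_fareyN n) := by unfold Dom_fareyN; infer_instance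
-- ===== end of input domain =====

-- B replaces A's repeated mediant-insertion passes by the Farey next-term recurrence
-- k = (n+b)//d, emitting each term once (objective: faster).

-- ===== PORT A =====
-- one body of A's inner for-loop: i is the loop index; list reads xs[i] are in range
-- on every reachable state (i+1 < len(farey), proved in the lemmas), so List.getD is exact
def aStep (n : Int) (st : List (List Int) × Bool) (i : Nat) : List (List Int) × Bool :=
  let farey := st.1
  let x := farey.getD i []
  let y := farey.getD (i + 1) []
  let s0 := x.getD 0 0 + y.getD 0 0         -- new_item numerator before reduction
  let s1 := x.getD 1 0 + y.getD 1 0         -- new_item denominator before reduction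
  let g : Int := Int.gcd s0 s1              -- math.gcd
  let u := PySem.Int.floordiv s0 g
  let v := PySem.Int.floordiv s1 g
  if v > n then st
  else (PySem.List.insert farey ((i : Int) + 1) [u, v], true)

-- one pass: for i in range(len(farey)-1)
def aPass (n : Int) (farey : List (List Int)) : List (List Int) × Bool :=
  (List.range (farey.length - 1)).foldl (aStep n) (farey, false)

-- the while loop; fuel (n.toNat+2)^2 provably suffices (lemma aLoop_final below)
def aLoop (n : Int) : Nat → List (List Int) → List (List Int)
  | 0, farey => farey
  | f + 1, farey =>
    let p := aPass n farey
    if p.2 then aLoop n f p.1 else p.1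

def fareyN (n : Int) : List (List Int) :=
  aLoop n ((n.toNat + 2) * (n.toNat + 2)) [[0, 1], [1, 1]]

-- ===== PORT B =====
-- the while loop of Source B; fuel (n.toNat+2)^2 provably suffices (lemma bGo_spec below)
def bGo (m : Int) : Nat → Int → Int → Int → Int → List (List Int) → List (List Int)
  | 0, _, _, _, _, acc => acc
  | f + 1, a, b, c, d, acc =>
    if c ≤ m then
      let k := PySem.Int.floordiv (m + b) d
      bGo m f c d (k * c - a) (k * d - b) (acc ++ [[c, d]])
    else acc

def fareyN_alt (n : Int) : List (List Int) :=
  let m := if n > 1 then n else 1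
  bGo m ((n.toNat + 2) * (n.toNat + 2)) 0 1 1 m [[0, 1]]

-- ===== PRECONDITION & SPEC =====
def Spec_fareyN (n : Int) (out : List (List Int)) : Prop := out = fareyN_alt n
instance (n : Int) (out : List (List Int)) : Decidable (Spec_fareyN n out) := by unfold Spec_fareyN; infer_instance

-- ===== CLAIM (what is proved, stated in full; the proofs are below) =====
def Claim_equal_fareyN : Prop := ∀ (n : Int), Dom_fareyN n → Spec_fareyN n (fareyN n)

-- ===== LEMMAS AND PROOFS =====

-- numerator / denominator of a two-element list [a, b]
def pvNum (z : List Int) : Int := z.getD 0 0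
def pvDen (z : List Int) : Int := z.getD 1 0

-- adjacency invariant of Farey/Stern-Brocot neighbours: b*c - a*d = 1
def pvRel (x y : List Int) : Prop := pvDen x * pvNum y - pvNum x * pvDen y = 1

-- element bounds: a reduced fraction 0 ≤ a/b ≤ 1 with 1 ≤ b ≤ m, stored as [a, b]
def pvBnd (m : Int) (z : List Int) : Prop :=
  z = [pvNum z, pvDen z] ∧ 0 ≤ pvNum z ∧ pvNum z ≤ pvDen z ∧ 1 ≤ pvDen z ∧ pvDen z ≤ m

-- saturation: the mediant of each adjacent pair has denominator > m
def pvMed (m : Int) (x y : List Int) : Prop := m < pvDen x + pvDen y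

def pvInv (m : Int) (L : List (List Int)) : Prop :=
  L.head? = some [0, 1] ∧ L.getLast? = some [1, 1] ∧
  List.IsChain pvRel L ∧ ∀ z ∈ L, pvBnd m z

-- structural description of one of A's passes (k remaining loop steps)
def passGo (n : Int) : Nat → List (List Int) → List (List Int) × Bool
  | 0, B => (B, false)
  | _ + 1, [] => ([], false)
  | _ + 1, [x] => ([x], false)
  | k + 1, x :: y :: rest =>
    let s0 := pvNum x + pvNum y
    let s1 := pvDen x + pvDen y
    if s1 > n then
      let p := passGo n k (y :: rest)
      (x :: p.1, p.2)
    else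
      let p := passGo n k ([s0, s1] :: y :: rest)
      (x :: p.1, true)

lemma gcd_mediant_eq_one (x y : List Int) (h : pvRel x y) :
    Int.gcd (pvNum x + pvNum y) (pvDen x + pvDen y) = 1 := by
  have hd : (↑(Int.gcd (pvNum x + pvNum y) (pvDen x + pvDen y)) : Int) ∣ 1 := by
    have h1 := Int.gcd_dvd_left (a := pvNum x + pvNum y) (b := pvDen x + pvDen y)
    have h2 := Int.gcd_dvd_right (a := pvNum x + pvNum y) (b := pvDen x + pvDen y)
    have : (↑(Int.gcd (pvNum x + pvNum y) (pvDen x + pvDen y)) : Int) ∣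
        pvDen x * (pvNum x + pvNum y) - pvNum x * (pvDen x + pvDen y) :=
      Dvd.dvd.sub (Dvd.dvd.mul_left h1 _) (Dvd.dvd.mul_left h2 _)
    have he : pvDen x * (pvNum x + pvNum y) - pvNum x * (pvDen x + pvDen y) = 1 := by
      unfold pvRel at h; ring_nf; ring_nf at h; omega
    rwa [he] at this
  have := Int.isUnit_iff.mp (isUnit_of_dvd_one hd)
  omega

lemma pvFloordivOne (a : Int) : PySem.Int.floordiv a 1 = a := by
  rw [PySem.Int.floordiv_eq_ediv_of_pos (by norm_num)]; exact Int.ediv_one a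

-- A's indexed fold over the mutating list equals the structural pass
lemma fold_eq_passGo (n : Int) : ∀ (k i : Nat) (A B : List (List Int)) (f : Bool),
    A.length = i → k + 1 ≤ B.length → List.IsChain pvRel B →
    (List.range' i k 1).foldl (aStep n) (A ++ B, f) =
      (A ++ (passGo n k B).1, f || (passGo n k B).2)
  | 0, i, A, B, f, hi, hk, hc => by simp [passGo]
  | k + 1, i, A, B, f, hi, hk, hc => by
    match B, hk with
    | x :: y :: rest, hk =>
      obtain ⟨hxy, hc'⟩ := List.isChain_cons_cons.mp hc
      have hgcd := gcd_mediant_eq_one x y hxy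
      simp only [pvNum, pvDen] at hgcd
      have hx : (A ++ x :: y :: rest).getD i [] = x := by
        rw [← hi, List.getD_append_right A _ [] A.length le_rfl]; simp
      have hy : (A ++ x :: y :: rest).getD (i + 1) [] = y := by
        rw [← hi, List.getD_append_right A _ [] (A.length + 1) (by omega)]; simp
      have hlen : k + 1 ≤ (y :: rest).length := by simp at hk ⊢; omega
      rw [List.range'_succ, List.foldl_cons]
      by_cases hs : pvDen x + pvDen y > n
      · have ha : aStep n (A ++ x :: y :: rest, f) i = (A ++ x :: y :: rest, f) := by
          simp only [aStep, hx, hy, hgcd]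
          rw [if_pos (by simpa [pvDen, pvFloordivOne] using hs)]
        rw [ha]
        have hA : A ++ x :: y :: rest = (A ++ [x]) ++ (y :: rest) := by simp
        rw [hA, fold_eq_passGo n k (i + 1) (A ++ [x]) (y :: rest) f (by simp [← hi]) hlen hc']
        simp only [passGo]
        rw [if_pos hs]
        simp
      · have hRelMy : pvRel [pvNum x + pvNum y, pvDen x + pvDen y] y := by
          unfold pvRel pvNum pvDen at hxy ⊢
          simp only [List.getD_cons_zero, List.getD_cons_succ]
          ring_nf at hxy ⊢; omega
        have hcM : List.IsChain pvRel ([pvNum x + pvNum y, pvDen x + pvDen y] :: y :: rest) :=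
          List.isChain_cons_cons.mpr ⟨hRelMy, hc'⟩
        have ha : aStep n (A ++ x :: y :: rest, f) i =
            ((A ++ [x]) ++ ([pvNum x + pvNum y, pvDen x + pvDen y] :: y :: rest), true) := by
          simp only [aStep, hx, hy, hgcd]
          rw [if_neg (by simpa [pvDen, pvFloordivOne] using hs)]
          have hcast : (i : Int) + 1 = ((i + 1 : Nat) : Int) := by push_cast; ring
          rw [hcast, PySem.List.insert_natCast _ _ _ (by simp only [List.length_append, List.length_cons, ← hi]; omega)]
          have hA : A ++ x :: y :: rest = (A ++ [x]) ++ (y :: rest) := by simp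
          have ht : ((A ++ [x]) ++ (y :: rest)).take (i + 1) = A ++ [x] :=
            List.take_left' (by simp [← hi])
          have hd : ((A ++ [x]) ++ (y :: rest)).drop (i + 1) = y :: rest :=
            List.drop_left' (by simp [← hi])
          rw [hA, ht, hd]
          simp [pvNum, pvDen]
        rw [ha, fold_eq_passGo n k (i + 1) (A ++ [x]) _ true (by simp [← hi]) (by have := hlen; simp at this ⊢; omega) hcM]
        simp only [passGo]
        rw [if_neg hs]
        simp

lemma aPass_eq_passGo (n : Int) (L : List (List Int)) (h1 : 1 ≤ L.length)
    (hc : List.IsChain pvRel L) :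
    aPass n L = passGo n (L.length - 1) L := by
  have h := fold_eq_passGo n (L.length - 1) 0 [] L false rfl (by omega) hc
  simp only [List.nil_append, Bool.false_or] at h
  rw [aPass, List.range_eq_range', h]

lemma passGo_inv (n m : Int) (hm : m = max n 1) : ∀ (k : Nat) (B : List (List Int)),
    List.IsChain pvRel B → (∀ z ∈ B, pvBnd m z) →
    List.IsChain pvRel (passGo n k B).1 ∧ (∀ z ∈ (passGo n k B).1, pvBnd m z) ∧
    (passGo n k B).1.head? = B.head? ∧ (passGo n k B).1.getLast? = B.getLast? ∧
    B.length ≤ (passGo n k B).1.length ∧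
    ((passGo n k B).2 = true → B.length < (passGo n k B).1.length)
  | 0, B, hc, hb => by
    simp only [passGo]; refine ⟨hc, hb, ?_, ?_, ?_, ?_⟩ <;> simp
  | k + 1, [], hc, hb => by
    simp only [passGo]; refine ⟨hc, hb, ?_, ?_, ?_, ?_⟩ <;> simp
  | k + 1, [x], hc, hb => by
    simp only [passGo]; refine ⟨hc, hb, ?_, ?_, ?_, ?_⟩ <;> simp
  | k + 1, x :: y :: rest, hc, hb => by
    obtain ⟨hxy, hc'⟩ := List.isChain_cons_cons.mp hc
    by_cases hs : pvDen x + pvDen y > n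
    · have ih := passGo_inv n m hm k (y :: rest) hc' (fun z hz => hb z (List.mem_cons_of_mem _ hz))
      obtain ⟨i1, i2, i3, i4, i5, i6⟩ := ih
      have hne : (passGo n k (y :: rest)).1 ≠ [] := by
        intro h0; rw [h0] at i3; simp at i3
      simp only [passGo, if_pos hs]
      refine ⟨?_, ?_, by simp, ?_,
        by simp only [List.length_cons] at i5 ⊢; omega,
        by intro h; have := i6 h; simp only [List.length_cons] at this ⊢; omega⟩
      · exact i1.cons (by rw [i3]; intro z hz; simp at hz; exact hz ▸ hxy)
      · intro z hz
        rcases List.mem_cons.mp hz with h | h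
        · exact h ▸ hb x (by simp)
        · exact i2 z h
      · obtain ⟨w, l', hw⟩ := List.exists_cons_of_ne_nil hne
        rw [hw, List.getLast?_cons_cons, ← hw, i4, List.getLast?_cons_cons]
    · -- insertion of the mediant M = [s0, s1]
      have hbx := hb x (by simp); have hby := hb y (by simp)
      have hRelxM : pvRel x [pvNum x + pvNum y, pvDen x + pvDen y] := by
        unfold pvRel pvNum pvDen at hxy ⊢
        simp only [List.getD_cons_zero, List.getD_cons_succ]
        ring_nf at hxy ⊢; omega
      have hRelMy : pvRel [pvNum x + pvNum y, pvDen x + pvDen y] y := by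
        unfold pvRel pvNum pvDen at hxy ⊢
        simp only [List.getD_cons_zero, List.getD_cons_succ]
        ring_nf at hxy ⊢; omega
      have hbM : pvBnd m [pvNum x + pvNum y, pvDen x + pvDen y] := by
        obtain ⟨_, a1, a2, a3, a4⟩ := hbx; obtain ⟨_, b1, b2, b3, b4⟩ := hby
        have hs' := hs
        refine ⟨by simp [pvNum, pvDen], ?_, ?_, ?_, ?_⟩ <;>
          (simp only [pvNum, pvDen, List.getD_cons_zero, List.getD_cons_succ]
            at a1 a2 a3 a4 b1 b2 b3 b4 hs' ⊢; omega)
      have hcM : List.IsChain pvRel ([pvNum x + pvNum y, pvDen x + pvDen y] :: y :: rest) :=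
        List.isChain_cons_cons.mpr ⟨hRelMy, hc'⟩
      have hbM' : ∀ z ∈ [pvNum x + pvNum y, pvDen x + pvDen y] :: y :: rest, pvBnd m z := by
        intro z hz
        rcases List.mem_cons.mp hz with h | h
        · exact h ▸ hbM
        · exact hb z (List.mem_cons_of_mem _ h)
      have ih := passGo_inv n m hm k _ hcM hbM'
      obtain ⟨i1, i2, i3, i4, i5, i6⟩ := ih
      have hne : (passGo n k ([pvNum x + pvNum y, pvDen x + pvDen y] :: y :: rest)).1 ≠ [] := by
        intro h0; rw [h0] at i3; simp at i3
      simp only [passGo, if_neg hs]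
      refine ⟨?_, ?_, by simp, ?_,
        by simp only [List.length_cons] at i5 ⊢; omega,
        by intro _; simp only [List.length_cons] at i5 ⊢; omega⟩
      · exact i1.cons (by rw [i3]; intro z hz; simp at hz; exact hz ▸ hRelxM)
      · intro z hz
        rcases List.mem_cons.mp hz with h | h
        · exact h ▸ hb x (by simp)
        · exact i2 z h
      · obtain ⟨w, l', hw⟩ := List.exists_cons_of_ne_nil hne
        rw [hw, List.getLast?_cons_cons, ← hw, i4, List.getLast?_cons_cons,
          List.getLast?_cons_cons]

lemma passGo_false (n : Int) : ∀ (k : Nat) (B : List (List Int)),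
    (passGo n k B).2 = false → (passGo n k B).1 = B
  | 0, B => by simp [passGo]
  | k + 1, [] => by simp [passGo]
  | k + 1, [x] => by simp [passGo]
  | k + 1, x :: y :: rest => by
    intro hf
    by_cases hs : pvDen x + pvDen y > n
    · simp only [passGo, if_pos hs] at hf ⊢
      rw [passGo_false n k (y :: rest) hf]
    · simp [passGo, if_neg hs] at hf

lemma passGo_false_med (n m : Int) (hm : m = max n 1) : ∀ (k : Nat) (B : List (List Int)),
    (∀ z ∈ B, pvBnd m z) → (passGo n k B).2 = false → B.length ≤ k + 1 →
    List.IsChain (pvMed m) B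
  | 0, [], _, _, _ => by simp
  | 0, [x], _, _, _ => by simp
  | 0, x :: y :: rest, _, _, hlen => by simp at hlen
  | k + 1, [], _, _, _ => by simp
  | k + 1, [x], _, _, _ => by simp
  | k + 1, x :: y :: rest, hb, hf, hlen => by
    by_cases hs : pvDen x + pvDen y > n
    · simp only [passGo, if_pos hs] at hf
      have ih := passGo_false_med n m hm k (y :: rest)
        (fun z hz => hb z (List.mem_cons_of_mem _ hz)) hf (by simpa using hlen)
      refine List.isChain_cons_cons.mpr ⟨?_, ih⟩
      have h1 := (hb x (by simp)).2.2.2.1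
      have h2 := (hb y (by simp)).2.2.2.1
      unfold pvMed; omega
    · simp [passGo, if_neg hs] at hf

lemma rel_lt (x y : List Int) (h : pvRel x y) : pvNum x * pvDen y < pvNum y * pvDen x := by
  unfold pvRel at h; ring_nf at h ⊢; omega

lemma isChain_tail {R : List Int → List Int → Prop} : ∀ {L : List (List Int)} {x : List Int},
    List.IsChain R (x :: L) → List.IsChain R L
  | [], _, _ => by simp
  | y :: l, x, h => (List.isChain_cons_cons.mp h).2

lemma head_lt (m : Int) : ∀ (l : List (List Int)) (x : List Int),
    List.IsChain pvRel (x :: l) → (∀ z ∈ x :: l, pvBnd m z) →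
    ∀ y ∈ l, pvNum x * pvDen y < pvNum y * pvDen x
  | [], x, _, _ => by simp
  | y :: l', x, hc, hb => by
    obtain ⟨hxy, hc'⟩ := List.isChain_cons_cons.mp hc
    intro z hz
    rcases List.mem_cons.mp hz with h | h
    · subst h; exact rel_lt x z hxy
    · have hyz := head_lt m l' y hc' (fun w hw => hb w (List.mem_cons_of_mem _ hw)) z h
      have hxy' := rel_lt x y hxy
      obtain ⟨_, hnx, _, hdx, _⟩ := hb x (by simp)
      obtain ⟨_, hny, _, hdy, _⟩ := hb y (by simp)
      obtain ⟨_, hnz, _, hdz, _⟩ := hb z (by simp [h])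
      nlinarith [hxy', hyz, hdx, hdy, hdz, hnx, hny, hnz]

lemma chain_pairwise (m : Int) : ∀ (L : List (List Int)), List.IsChain pvRel L →
    (∀ z ∈ L, pvBnd m z) →
    L.Pairwise (fun x y => pvNum x * pvDen y < pvNum y * pvDen x)
  | [], _, _ => by simp
  | x :: l, hc, hb =>
    List.Pairwise.cons (head_lt m l x hc hb)
      (chain_pairwise m l (isChain_tail hc) (fun w hw => hb w (List.mem_cons_of_mem _ hw)))

-- a chain of unimodular neighbours is strictly increasing, hence short
lemma inv_length_le (m : Int) (L : List (List Int)) (hc : List.IsChain pvRel L)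
    (hb : ∀ z ∈ L, pvBnd m z) : L.length ≤ (m.toNat + 1) * (m.toNat + 1) := by
  have hp := chain_pairwise m L hc hb
  have hp' : L.Pairwise (fun x y =>
      ((pvNum x).toNat, (pvDen x).toNat) ≠ ((pvNum y).toNat, (pvDen y).toNat)) := by
    refine hp.imp_of_mem ?_
    intro a b ha hbmem hlt hf
    obtain ⟨_, ha0, _, ha1, _⟩ := hb a ha
    obtain ⟨_, hb0, _, hb1, _⟩ := hb b hbmem
    rw [Prod.mk.injEq] at hf
    have e1 : pvNum a = pvNum b := by omega
    have e2 : pvDen a = pvDen b := by omega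
    rw [e1, e2] at hlt
    exact lt_irrefl _ hlt
  have hnd : (L.map (fun z => ((pvNum z).toNat, (pvDen z).toNat))).Nodup :=
    List.pairwise_map.mpr hp'
  have hsub : (L.map (fun z => ((pvNum z).toNat, (pvDen z).toNat))).toFinset ⊆
      Finset.range (m.toNat + 1) ×ˢ Finset.range (m.toNat + 1) := by
    intro p hpmem
    rw [List.mem_toFinset, List.mem_map] at hpmem
    obtain ⟨z, hz, rfl⟩ := hpmem
    obtain ⟨_, h0, h1, h2, h3⟩ := hb z hz
    rw [Finset.mem_product, Finset.mem_range, Finset.mem_range]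
    constructor <;> simp <;> omega
  have hcard := Finset.card_le_card hsub
  rw [List.toFinset_card_of_nodup hnd] at hcard
  simpa using hcard

lemma aLoop_final (n m : Int) (hm : m = max n 1) : ∀ (fuel : Nat) (L : List (List Int)),
    pvInv m L → (m.toNat + 1) * (m.toNat + 1) + 1 ≤ L.length + fuel →
    pvInv m (aLoop n fuel L) ∧ List.IsChain (pvMed m) (aLoop n fuel L)
  | 0, L, hInv, hfuel => by
    exfalso
    have := inv_length_le m L hInv.2.2.1 hInv.2.2.2
    omega
  | fuel + 1, L, hInv, hfuel => by
    obtain ⟨hh, hl, hc, hb⟩ := hInv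
    have h1 : 1 ≤ L.length := by
      cases L with
      | nil => simp at hh
      | cons a t => simp only [List.length_cons]; omega
    have hpg := aPass_eq_passGo n L h1 hc
    obtain ⟨i1, i2, i3, i4, i5, i6⟩ := passGo_inv n m hm (L.length - 1) L hc hb
    by_cases hp : (passGo n (L.length - 1) L).2 = true
    · have ih := aLoop_final n m hm fuel (passGo n (L.length - 1) L).1
        ⟨i3.trans hh, i4.trans hl, i1, i2⟩
        (by have := i6 hp; omega)
      simpa only [aLoop, hpg, hp, if_true] using ih
    · have hfix := passGo_false n (L.length - 1) L (by simpa using hp)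
      have hmed := passGo_false_med n m hm (L.length - 1) L hb (by simpa using hp) (by omega)
      simp only [aLoop, hpg, hp, if_false, Bool.false_eq_true]
      rw [hfix]
      exact ⟨⟨hh, hl, hc, hb⟩, hmed⟩

lemma bGo_stop (m : Int) (f : Nat) (a b c d : Int) (acc : List (List Int)) (h : m < c) :
    bGo m f a b c d acc = acc := by
  cases f <;> simp [bGo, not_le.mpr h]

-- B regenerates every saturated unimodular chain from its first two elements
lemma bGo_spec (m : Int) (hm1 : 1 ≤ m) : ∀ (rest : List (List Int)) (prev cur : List Int)
    (fuel : Nat) (acc : List (List Int)),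
    List.IsChain pvRel (prev :: cur :: rest) → List.IsChain (pvMed m) (prev :: cur :: rest) →
    (∀ z ∈ prev :: cur :: rest, pvBnd m z) →
    (cur :: rest).getLast? = some [1, 1] → rest.length + 1 ≤ fuel →
    bGo m fuel (pvNum prev) (pvDen prev) (pvNum cur) (pvDen cur) acc = acc ++ (cur :: rest)
  | [], prev, cur, fuel, acc, hc, hmed, hb, hlast, hfuel => by
    have hcur : cur = [1, 1] := by simpa using hlast
    subst hcur
    obtain ⟨hRel, -⟩ := List.isChain_cons_cons.mp hc
    unfold pvRel at hRel
    have hnum : pvNum [(1 : Int), 1] = 1 := rfl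
    have hden : pvDen [(1 : Int), 1] = 1 := rfl
    rw [hnum, hden] at hRel ⊢
    match fuel, hfuel with
    | f + 1, _ =>
      simp only [bGo]
      rw [if_pos hm1, pvFloordivOne]
      rw [bGo_stop m f _ _ _ _ _ (by omega)]
  | e :: rest', prev, cur, fuel, acc, hc, hmed, hb, hlast, hfuel => by
    obtain ⟨hRel1, hc'⟩ := List.isChain_cons_cons.mp hc
    obtain ⟨hRel2, -⟩ := List.isChain_cons_cons.mp hc'
    obtain ⟨-, hmed'⟩ := List.isChain_cons_cons.mp hmed
    obtain ⟨hMed2, -⟩ := List.isChain_cons_cons.mp hmed'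
    obtain ⟨hcur2, hcn0, hcnd, hcd1, hcdm⟩ := hb cur (by simp)
    obtain ⟨he2, hen0, hend, hed1, hedm⟩ := hb e (by simp)
    have h1 : pvDen prev * pvNum cur - pvNum prev * pvDen cur = 1 := hRel1
    have h2 : pvDen cur * pvNum e - pvNum cur * pvDen e = 1 := hRel2
    have key : pvDen cur * (pvNum e + pvNum prev) = pvNum cur * (pvDen e + pvDen prev) := by
      linear_combination h2 - h1
    have hcop : IsCoprime (pvDen cur) (pvNum cur) :=
      ⟨-pvNum prev, pvDen prev, by linear_combination h1⟩
    have hdvd : pvDen cur ∣ pvDen e + pvDen prev := by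
      refine hcop.dvd_of_dvd_mul_left ⟨pvNum e + pvNum prev, ?_⟩
      exact key.symm
    obtain ⟨t, ht⟩ := hdvd
    have htn : pvNum e + pvNum prev = pvNum cur * t := by
      have hd0 : pvDen cur ≠ 0 := by omega
      apply mul_left_cancel₀ hd0
      rw [key, ht]; ring
    unfold pvMed at hMed2
    have hub : pvDen cur * t ≤ m + pvDen prev := by omega
    have hlb : m + pvDen prev < pvDen cur * t + pvDen cur := by omega
    have hk : PySem.Int.floordiv (m + pvDen prev) (pvDen cur) = t := by
      rw [PySem.Int.floordiv_eq_iff_of_pos (by omega)]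
      constructor
      · calc t * pvDen cur = pvDen cur * t := by ring
          _ ≤ m + pvDen prev := hub
      · calc m + pvDen prev < pvDen cur * t + pvDen cur := hlb
          _ = (t + 1) * pvDen cur := by ring
    match fuel, hfuel with
    | f + 1, hfuel2 =>
      simp only [bGo]
      rw [if_pos (le_trans hcnd hcdm), hk]
      have hce : t * pvNum cur - pvNum prev = pvNum e := by
        have hcomm : pvNum cur * t = t * pvNum cur := by ring
        omega
      have hde : t * pvDen cur - pvDen prev = pvDen e := by
        have hcomm : pvDen cur * t = t * pvDen cur := by ring
        omega
      rw [hce, hde, ← hcur2]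
      have ih := bGo_spec m hm1 rest' cur e f (acc ++ [cur]) hc' hmed'
        (fun z hz => hb z (List.mem_cons_of_mem _ hz))
        (by rw [← hlast, List.getLast?_cons_cons]) (by simp only [List.length_cons] at hfuel2 ⊢; omega)
      rw [ih]; simp

lemma max_eq_ite (n : Int) : (if n > 1 then n else 1) = max n 1 := by
  split_ifs <;> omega

-- ===== VERDICT (by name: the statement is the Claim_ definition above) =====
theorem fareyN_spec : Claim_equal_fareyN := by
  unfold Claim_equal_fareyN
  intro n _
  unfold Spec_fareyN
  have hm1 : (1 : Int) ≤ max n 1 := le_max_right n 1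
  have hsq : ((max n 1).toNat + 1) * ((max n 1).toNat + 1) ≤ (n.toNat + 2) * (n.toNat + 2) := by
    have h : (max n 1).toNat + 1 ≤ n.toNat + 2 := by omega
    exact Nat.mul_le_mul h h
  have hInit : pvInv (max n 1) [[0, 1], [1, 1]] := by
    refine ⟨rfl, rfl, ?_, ?_⟩
    · refine List.isChain_cons_cons.mpr ⟨?_, by simp⟩
      unfold pvRel pvNum pvDen; simp
    · intro z hz
      rcases List.mem_cons.mp hz with h | h
      · subst h; exact ⟨rfl, by norm_num [pvNum], by norm_num [pvNum, pvDen],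
          by norm_num [pvDen], by simp [pvDen]⟩
      · simp at h; subst h
        exact ⟨rfl, by norm_num [pvNum], by norm_num [pvNum, pvDen],
          by norm_num [pvDen], by simp [pvDen]⟩
  have hA := aLoop_final n (max n 1) rfl ((n.toNat + 2) * (n.toNat + 2)) [[0, 1], [1, 1]]
    hInit (by simp only [List.length_cons, List.length_nil]; omega)
  obtain ⟨⟨hh, hl, hc, hb⟩, hmed⟩ := hA
  have hlen := inv_length_le (max n 1) _ hc hb
  rw [show fareyN n = aLoop n ((n.toNat + 2) * (n.toNat + 2)) [[0, 1], [1, 1]] from rfl]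
  generalize aLoop n ((n.toNat + 2) * (n.toNat + 2)) [[0, 1], [1, 1]] = L at hh hl hc hb hmed hlen ⊢
  have hshape : ∃ T0 T', L = [0, 1] :: T0 :: T' := by
    match L, hh, hl with
    | [], hh, _ => simp at hh
    | [a], hh, hl =>
      exfalso; simp at hh hl; subst hh; simp at hl
    | a :: T0 :: T', hh, _ =>
      exact ⟨T0, T', by simp at hh; rw [hh]⟩
  obtain ⟨T0, T', rfl⟩ := hshape
  · obtain ⟨hR0, -⟩ := List.isChain_cons_cons.mp hc
    obtain ⟨hM0, -⟩ := List.isChain_cons_cons.mp hmed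
    obtain ⟨hT02, hT0n0, hT0nd, hT0d1, hT0dm⟩ := hb T0 (by simp)
    have hnum : pvNum T0 = 1 := by
      have h := hR0; unfold pvRel at h
      rw [show pvDen [(0 : Int), 1] = 1 from rfl, show pvNum [(0 : Int), 1] = 0 from rfl] at h
      linarith
    have hden : pvDen T0 = max n 1 := by
      have h := hM0; unfold pvMed at h
      rw [show pvDen [(0 : Int), 1] = 1 from rfl] at h
      omega
    have hfuel : T'.length + 1 ≤ (n.toNat + 2) * (n.toNat + 2) := by
      have hc3 : ([[0, 1], T0] ++ T').length = T'.length + 2 := by simp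
      simp only [List.cons_append, List.nil_append] at hc3
      omega
    have hgo := bGo_spec (max n 1) hm1 T' [0, 1] T0 ((n.toNat + 2) * (n.toNat + 2))
      [[0, 1]] hc hmed hb (by rw [← hl, List.getLast?_cons_cons]) hfuel
    rw [show pvNum [(0 : Int), 1] = 0 from rfl, show pvDen [(0 : Int), 1] = 1 from rfl,
      hnum, hden] at hgo
    rw [fareyN_alt]
    simp only [max_eq_ite]
    rw [hgo]
    simp
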